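-- pv_equiv track=rewrite | github.com/theBappy/top-asked-dsa-problem-solving | dynamice programming/1964.py | longestObstacleCourseAtEachPosition
-- ===== SOURCE A (Python) =====
-- from bisect import bisect_right
--
-- def longestObstacleCourseAtEachPosition(obstacles):
--     # Get the number of obstacles
--     n = len(obstacles)
--     # This will store the longest increasing subsequence
--     LIS = []
--     # This will store the result for each position
--     result = [0] * n
--
--     # Iterate through each obstacle
--     for i in range(n):
--         # Find the index where the current obstacle can be placed
--         idx = bisect_right(LIS, obstacles[i])
--         # If idx is equal to the length of LIS, it means we can extend the LIS
--         if idx == len(LIS):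
--             LIS.append(obstacles[i])  # Add the current obstacle to LIS
--         else:
--             LIS[idx] = obstacles[i]  # Replace the element at idx with the current obstacle
--         # Store the length of the LIS at this position (idx + 1)
--         result[i] = idx + 1
--
--     return result
-- ===== SOURCE B (Python) =====
-- def longestObstacleCourseAtEachPosition(obstacles):
--     # Direct quadratic DP: dp[i] = 1 + max dp[j] over j < i with obstacles[j] <= obstacles[i].
--     result = []
--     for x in obstacles:
--         best = 0
--         for v, d in zip(obstacles, result):
--             if v <= x and best < d:
--                 best = d
--         result.append(best + 1)
--     return result
-- ===== Notes on version B (the rewrite author's own statement) =====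
-- stated objective: simpler
-- what changed: Replaced the patience-sorting tails array with binary search (bisect_right) by the direct textbook quadratic DP: each entry is 1 + the best earlier entry whose obstacle is <= the current one.
import Mathlib
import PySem

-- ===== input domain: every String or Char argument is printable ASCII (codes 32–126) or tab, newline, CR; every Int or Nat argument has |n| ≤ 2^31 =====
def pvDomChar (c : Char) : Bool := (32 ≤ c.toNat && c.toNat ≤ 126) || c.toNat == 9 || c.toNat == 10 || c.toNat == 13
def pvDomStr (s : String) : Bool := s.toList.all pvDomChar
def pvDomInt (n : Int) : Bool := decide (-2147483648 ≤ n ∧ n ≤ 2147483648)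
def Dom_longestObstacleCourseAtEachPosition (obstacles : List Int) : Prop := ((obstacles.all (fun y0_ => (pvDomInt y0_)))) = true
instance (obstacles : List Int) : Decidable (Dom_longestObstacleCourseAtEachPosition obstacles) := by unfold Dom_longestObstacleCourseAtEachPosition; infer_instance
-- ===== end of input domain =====

-- B replaces the patience-sorting tails array + binary search by the direct quadratic DP
-- (each entry = 1 + best earlier entry with a smaller-or-equal obstacle); objective: simpler.


-- ===== PORT A =====
-- bisect_right(lis, x): lo/hi binary search, transliterated; the index mid is always in range,
-- so lis.getD mid 0 is exact for Python's lis[mid] here.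
def pvBisectRight (lis : List Int) (x : Int) (lo hi : Nat) : Nat :=
  if _h : lo < hi then
    let mid := (lo + hi) / 2
    if x < lis.getD mid 0 then pvBisectRight lis x lo mid
    else pvBisectRight lis x (mid + 1) hi
  else lo
termination_by hi - lo
decreasing_by all_goals omega

-- the main for-loop of A: state = (LIS, result accumulated in reverse)
def pvGoA : List Int → List Int → List Int → List Int
  | [], _, acc => acc.reverse
  | a :: rest, lis, acc =>
    let idx := pvBisectRight lis a 0 lis.length
    let lis' := if idx = lis.length then lis ++ [a] else lis.set idx a
    pvGoA rest lis' (((idx : Int) + 1) :: acc)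

def longestObstacleCourseAtEachPosition (obstacles : List Int) : List Int :=
  pvGoA obstacles [] []

-- ===== PORT B =====
-- inner loop of B: best dp among the (value, dp) pairs seen so far whose value is ≤ x
def pvBest (hist : List (Int × Int)) (x : Int) : Int :=
  hist.foldl (fun b p => if p.1 ≤ x ∧ b < p.2 then p.2 else b) 0

-- outer loop of B: hist is zip(obstacles, result) restricted to the processed prefix
def pvGoB : List Int → List (Int × Int) → List Int
  | [], _ => []
  | x :: rest, hist =>
    let d := pvBest hist x + 1
    d :: pvGoB rest (hist ++ [(x, d)])

def longestObstacleCourseAtEachPosition_alt (obstacles : List Int) : List Int :=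
  pvGoB obstacles []

-- ===== PRECONDITION & SPEC =====
def Spec_longestObstacleCourseAtEachPosition (obstacles : List Int) (out : List Int) : Prop := out = longestObstacleCourseAtEachPosition_alt obstacles
instance (obstacles : List Int) (out : List Int) : Decidable (Spec_longestObstacleCourseAtEachPosition obstacles out) := by unfold Spec_longestObstacleCourseAtEachPosition; infer_instance

-- ===== CLAIM (what is proved, stated in full; the proofs are below) =====
def Claim_equal_longestObstacleCourseAtEachPosition : Prop := ∀ (obstacles : List Int), Dom_longestObstacleCourseAtEachPosition obstacles → Spec_longestObstacleCourseAtEachPosition obstacles (longestObstacleCourseAtEachPosition obstacles)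

-- ===== LEMMAS AND PROOFS =====

-- number of elements ≤ x (for a sorted list, this is bisect_right's answer)
def pvCountLE (l : List Int) (x : Int) : Nat := l.countP (fun y => decide (y ≤ x))

lemma pvCountLE_le_length (l : List Int) (x : Int) : pvCountLE l x ≤ l.length :=
  List.countP_le_length

lemma pvCountLE_cons (h : Int) (t : List Int) (x : Int) :
    pvCountLE (h :: t) x = pvCountLE t x + (if h ≤ x then 1 else 0) := by
  simp only [pvCountLE, List.countP_cons, decide_eq_true_eq]

lemma pvCount_all (l : List Int) (a : Int) (h : ∀ y ∈ l, y ≤ a) : pvCountLE l a = l.length := by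
  rw [pvCountLE, List.countP_eq_length]
  intro y hy; simpa using h y hy

lemma pvCount_none (l : List Int) (a : Int) (h : ∀ y ∈ l, ¬ y ≤ a) : pvCountLE l a = 0 := by
  rw [pvCountLE, List.countP_eq_zero]
  intro y hy; simpa using h y hy

-- characterisation: in a sorted list, the elements ≤ x are exactly the first pvCountLE positions
lemma pvChar (l : List Int) (x : Int) (hs : l.Pairwise (· ≤ ·)) :
    ∀ i, i < l.length → (l.getD i 0 ≤ x ↔ i < pvCountLE l x) := by
  induction l with
  | nil => intro i hi; simp at hi
  | cons h t ih =>
    rw [List.pairwise_cons] at hs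
    intro i hi
    cases i with
    | zero =>
      by_cases hx : h ≤ x
      · have : 0 < pvCountLE (h :: t) x := by rw [pvCountLE_cons, if_pos hx]; omega
        exact iff_of_true hx (by simpa using this)
      · have ht : pvCountLE t x = 0 :=
          pvCount_none t x (fun y hy hyx => hx (le_trans (hs.1 y hy) hyx))
        have : pvCountLE (h :: t) x = 0 := by rw [pvCountLE_cons, if_neg hx, ht]
        exact iff_of_false hx (by omega)
    | succ j =>
      simp only [List.length_cons] at hi
      have hj := ih hs.2 j (by omega)
      rw [List.getD_cons_succ, pvCountLE_cons]
      by_cases hx : h ≤ x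
      · rw [if_pos hx]; omega
      · have ht : pvCountLE t x = 0 :=
          pvCount_none t x (fun y hy hyx => hx (le_trans (hs.1 y hy) hyx))
        rw [if_neg hx]; omega

-- binary search computes pvCountLE on a sorted list
lemma pvBisect_eq (l : List Int) (x : Int) (hs : l.Pairwise (· ≤ ·)) :
    ∀ lo hi, lo ≤ pvCountLE l x → pvCountLE l x ≤ hi → hi ≤ l.length →
      pvBisectRight l x lo hi = pvCountLE l x := by
  intro lo hi
  fun_induction pvBisectRight l x lo hi with
  | case1 lo hi h mid hlt ih =>
    intro h1 h2 h3
    have hmid : mid < l.length := by simp only [mid]; omega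
    have hc : ¬ mid < pvCountLE l x := fun hm => by
      have := (pvChar l x hs mid hmid).mpr hm; omega
    exact ih h1 (by omega) (by omega)
  | case2 lo hi h mid hge ih =>
    intro h1 h2 h3
    have hmid : mid < l.length := by simp only [mid]; omega
    have hc : mid < pvCountLE l x := (pvChar l x hs mid hmid).mp (by omega)
    exact ih (by omega) h2 h3
  | case3 lo hi h => intro h1 h2 h3; omega

-- A's LIS update, characterised: sortedness is preserved and counts update by a max formula
lemma pvUpdate (l : List Int) (a : Int) (hs : l.Pairwise (· ≤ ·)) :
    (if pvCountLE l a = l.length then l ++ [a] else l.set (pvCountLE l a) a).Pairwise (· ≤ ·) ∧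
    ∀ x, pvCountLE (if pvCountLE l a = l.length then l ++ [a] else l.set (pvCountLE l a) a) x
          = max (pvCountLE l x) (if a ≤ x then pvCountLE l a + 1 else 0) := by
  by_cases hcase : pvCountLE l a = l.length
  · -- append case: every element of l is ≤ a
    have hall : ∀ y ∈ l, y ≤ a := by
      have := hcase
      rw [pvCountLE, List.countP_eq_length] at this
      intro y hy; simpa using this y hy
    simp only [if_pos hcase]
    have hstep : ∀ x, pvCountLE (l ++ [a]) x = pvCountLE l x + (if a ≤ x then 1 else 0) := by
      intro x
      simp only [pvCountLE, List.countP_append, List.countP_cons, List.countP_nil,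
        decide_eq_true_eq]
      split_ifs with hx <;> omega
    constructor
    · rw [List.pairwise_append]
      exact ⟨hs, List.pairwise_singleton _ _,
        by intro y hy z hz; simp only [List.mem_singleton] at hz; subst hz; exact hall y hy⟩
    · intro x
      rw [hstep]
      by_cases hax : a ≤ x
      · have h1 : pvCountLE l x = l.length := pvCount_all l x (fun y hy => le_trans (hall y hy) hax)
        rw [if_pos hax, if_pos hax]; omega
      · rw [if_neg hax, if_neg hax]; omega
  · -- replace case: split l at position i = pvCountLE l a
    have hilen : pvCountLE l a < l.length := lt_of_le_of_ne (pvCountLE_le_length l a) hcase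
    have hchar := pvChar l a hs
    set i := pvCountLE l a with hi
    have hsplit : l = l.take i ++ l[i]'hilen :: l.drop (i + 1) := by
      conv_lhs => rw [← List.take_append_drop i l]
      rw [List.drop_eq_getElem_cons hilen]
    set tw := l.take i with htw
    set b := l[i]'hilen with hb
    set dw2 := l.drop (i + 1) with hdw2
    have htwlen : tw.length = i := by
      rw [htw, List.length_take]; omega
    have hba : ¬ b ≤ a := by
      have := (hchar i hilen).not.mpr (by omega)
      rwa [List.getD_eq_getElem?_getD, List.getElem?_eq_getElem hilen] at this
    have htw_le : ∀ y ∈ tw, y ≤ a := by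
      intro y hy
      obtain ⟨j, hj, rfl⟩ := List.getElem_of_mem hy
      have hjl : j < l.length := by rw [htwlen] at hj; omega
      have h1 : l.getD j 0 ≤ a := (hchar j hjl).mpr (by rw [htwlen] at hj; omega)
      rw [List.getD_eq_getElem?_getD, List.getElem?_eq_getElem hjl] at h1
      simpa [htw, List.getElem_take] using h1
    have hsorted' : (tw ++ b :: dw2).Pairwise (· ≤ ·) := by rw [← hsplit]; exact hs
    rw [List.pairwise_append] at hsorted'
    have hdw2_ge : ∀ y ∈ dw2, b ≤ y := (List.pairwise_cons.mp hsorted'.2.1).1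
    have hset : l.set i a = tw ++ a :: dw2 := by
      conv_lhs => rw [hsplit]
      rw [List.set_append_right _ _ (by omega)]
      rw [htwlen]
      simp
    simp only [if_neg hcase, hset]
    have hab : a < b := lt_of_not_ge hba
    constructor
    · rw [List.pairwise_append]
      refine ⟨hsorted'.1, ?_, ?_⟩
      · rw [List.pairwise_cons]
        exact ⟨fun y hy => le_trans (le_of_lt hab) (hdw2_ge y hy),
               (List.pairwise_cons.mp hsorted'.2.1).2⟩
      · intro y hy z hz
        rcases List.mem_cons.mp hz with rfl | hz2
        · exact htw_le y hy
        · exact le_trans (htw_le y hy) (le_trans (le_of_lt hab) (hdw2_ge z hz2))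
    · intro x
      have hcount_l : pvCountLE l x = pvCountLE tw x + (if b ≤ x then 1 else 0) + pvCountLE dw2 x := by
        conv_lhs => rw [hsplit]
        simp only [pvCountLE, List.countP_append, List.countP_cons, decide_eq_true_eq]
        split_ifs with hx <;> omega
      have hcount_s : pvCountLE (tw ++ a :: dw2) x
          = pvCountLE tw x + (if a ≤ x then 1 else 0) + pvCountLE dw2 x := by
        simp only [pvCountLE, List.countP_append, List.countP_cons, decide_eq_true_eq]
        split_ifs with hx <;> omega
      have htw_le_len : pvCountLE tw x ≤ i := by rw [← htwlen]; exact pvCountLE_le_length tw x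
      by_cases hbx : b ≤ x
      · have hax : a ≤ x := le_trans (le_of_lt hab) hbx
        have htwfull : pvCountLE tw x = i := by
          rw [← htwlen]; exact pvCount_all tw x (fun y hy => le_trans (htw_le y hy) hax)
        rw [hcount_s, hcount_l, if_pos hax, if_pos hbx, if_pos hax, htwfull]; omega
      · have hdw2_0 : pvCountLE dw2 x = 0 :=
          pvCount_none dw2 x (fun y hy hyx => hbx (le_trans (hdw2_ge y hy) hyx))
        by_cases hax : a ≤ x
        · have htwfull : pvCountLE tw x = i := by
            rw [← htwlen]; exact pvCount_all tw x (fun y hy => le_trans (htw_le y hy) hax)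
          rw [hcount_s, hcount_l, if_pos hax, if_neg hbx, if_pos hax, htwfull, hdw2_0]; omega
        · rw [hcount_s, hcount_l, if_neg hax, if_neg (fun h => hax (le_trans (le_of_lt hab) h)),
              if_neg hax, hdw2_0]; omega

-- pvBest over an extended history
lemma pvBest_append (hist : List (Int × Int)) (a d x : Int) :
    pvBest (hist ++ [(a, d)]) x
      = if a ≤ x ∧ pvBest hist x < d then d else pvBest hist x := by
  simp [pvBest, List.foldl_append]

-- the loop invariant tying A's tails array to B's history
def pvInv (lis : List Int) (hist : List (Int × Int)) : Prop :=
  lis.Pairwise (· ≤ ·) ∧ ∀ x, pvBest hist x = (pvCountLE lis x : Int)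

lemma pvMain : ∀ (rest lis : List Int) (hist : List (Int × Int)) (acc : List Int),
    pvInv lis hist → pvGoA rest lis acc = acc.reverse ++ pvGoB rest hist := by
  intro rest
  induction rest with
  | nil => intro lis hist acc _; simp [pvGoA, pvGoB]
  | cons a rest ih =>
    intro lis hist acc hinv
    obtain ⟨hs, hcnt⟩ := hinv
    have hidx : pvBisectRight lis a 0 lis.length = pvCountLE lis a :=
      pvBisect_eq lis a hs 0 lis.length (Nat.zero_le _) (pvCountLE_le_length lis a) le_rfl
    have hupd := pvUpdate lis a hs
    have hd : pvBest hist a + 1 = (pvCountLE lis a : Int) + 1 := by rw [hcnt]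
    have hinv' : pvInv (if pvCountLE lis a = lis.length then lis ++ [a] else lis.set (pvCountLE lis a) a)
        (hist ++ [(a, pvBest hist a + 1)]) := by
      refine ⟨hupd.1, ?_⟩
      intro x
      rw [pvBest_append, hupd.2 x, hcnt x, hcnt a]
      by_cases hax : a ≤ x
      · rw [if_pos hax]
        by_cases h2 : (pvCountLE lis x : Int) < (pvCountLE lis a : Int) + 1
        · rw [if_pos ⟨hax, h2⟩]; push_cast; omega
        · rw [if_neg (fun hh => h2 hh.2)]; push_cast; omega
      · rw [if_neg hax, if_neg (fun hh => hax hh.1)]; push_cast; omega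
    simp only [pvGoA, pvGoB, hidx]
    rw [ih _ _ _ hinv']
    simp [hd]

-- ===== VERDICT (by name: the statement is the Claim_ definition above) =====
theorem longestObstacleCourseAtEachPosition_spec : Claim_equal_longestObstacleCourseAtEachPosition := by
  intro obstacles _
  unfold Spec_longestObstacleCourseAtEachPosition longestObstacleCourseAtEachPosition
    longestObstacleCourseAtEachPosition_alt
  have := pvMain obstacles [] [] [] ⟨List.Pairwise.nil, by intro x; simp [pvBest, pvCountLE]⟩
  simpa using this
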